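-- pv_equiv track=rewrite | github.com/arcivanov/cloudify-dsl-parser | dsl_parser/elements/node_templates.py | _create_type_hierarchy
-- ===== SOURCE A (Python) =====
-- def _create_type_hierarchy(type_name, types):
--     """
--     Creates node types hierarchy as list where the last type in the list is
--     the actual node type.
--     """
--     current_type = types[type_name]
--     if 'derived_from' in current_type:
--         parent_type_name = current_type['derived_from']
--         types_hierarchy = _create_type_hierarchy(
--             type_name=parent_type_name,
--             types=types)
--         types_hierarchy.append(type_name)
--         return types_hierarchy
--     return [type_name]
-- ===== SOURCE B (Python) =====
-- def _create_type_hierarchy(type_name, types):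
--     """
--     Creates node types hierarchy as list where the last type in the list is
--     the actual node type.
--     """
--     parent = {name: spec.get('derived_from') for name, spec in types.items()}
--     chain = [type_name]
--     while parent[chain[-1]] is not None:
--         chain.append(parent[chain[-1]])
--     chain.reverse()
--     return chain
-- ===== Notes on version B (the rewrite author's own statement) =====
-- stated objective: alternative
-- what changed: Replaces the recursive parent-chain walk with a precomputed name-to-parent map built in one pass over types, an iterative child-first walk over that map, and a single final reverse.
import Mathlib
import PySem

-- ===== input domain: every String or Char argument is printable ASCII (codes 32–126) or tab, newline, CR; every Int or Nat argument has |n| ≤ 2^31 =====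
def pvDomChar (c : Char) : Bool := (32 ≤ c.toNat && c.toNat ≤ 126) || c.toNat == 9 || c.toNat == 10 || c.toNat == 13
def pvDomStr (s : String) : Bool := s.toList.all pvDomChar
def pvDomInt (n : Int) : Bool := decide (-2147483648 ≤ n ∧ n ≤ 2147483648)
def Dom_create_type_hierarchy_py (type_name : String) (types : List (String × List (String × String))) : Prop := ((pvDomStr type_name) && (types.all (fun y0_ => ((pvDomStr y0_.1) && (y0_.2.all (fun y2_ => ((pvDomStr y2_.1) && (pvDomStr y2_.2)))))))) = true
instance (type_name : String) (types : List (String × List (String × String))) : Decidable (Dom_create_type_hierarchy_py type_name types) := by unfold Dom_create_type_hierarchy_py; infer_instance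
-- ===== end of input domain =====

-- B precomputes a name→parent map, walks it iteratively and reverses once; return value proved equal to A's recursion on Pre_.
-- ===== PORT A =====
-- A's recursion walks the derived_from chain; in Lean it needs a fuel counter for
-- totality (types.length + 1 suffices on every input in Pre_, since a terminating
-- Python chain never revisits a key). Fuel exhaustion / missing key return [] — those
-- inputs are exactly where Python A raises (RecursionError / KeyError), excluded by Pre_.
def aWalk (types : List (String × List (String × String))) : Nat → String → List String
  | 0, _ => []
  | n + 1, type_name =>
    match (PySem.Dict.mk types).get? type_name with
    | none => []  -- Python: KeyError (outside Pre_)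
    | some current_type =>
      match (PySem.Dict.mk current_type).get? "derived_from" with
      | some parent_type_name => aWalk types n parent_type_name ++ [type_name]
      | none => [type_name]

def create_type_hierarchy_py (type_name : String) (types : List (String × List (String × String))) : List String :=
  aWalk types (types.length + 1) type_name

-- ===== PORT B =====
-- the dict comprehension: one pass over types.items(); its keys are the (distinct)
-- keys of the types dict, so Dict.mk of the mapped list is exact
def bParentMap (types : List (String × List (String × String))) : PySem.Dict String (Option String) :=
  PySem.Dict.mk (types.map (fun p => (p.1, (PySem.Dict.mk p.2).get? "derived_from")))

-- the while loop; fuel for totality (a cycle makes the Python loop forever, outside Pre_)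
def bWalk (parent : PySem.Dict String (Option String)) : Nat → List String → List String
  | 0, chain => chain
  | n + 1, chain =>
    match chain.getLast? with
    | none => chain  -- unreachable: chain starts nonempty and only grows
    | some last =>
      match parent.get? last with  -- parent[chain[-1]]
      | none => chain              -- Python: KeyError (outside Pre_)
      | some none => chain         -- parent is None: loop ends
      | some (some p) => bWalk parent n (chain ++ [p])

def create_type_hierarchy_py_alt (type_name : String) (types : List (String × List (String × String))) : List String :=
  (bWalk (bParentMap types) (types.length + 1) [type_name]).reverse

-- ===== PRECONDITION & SPEC =====
-- Pre_ excludes exactly the inputs on which Python A raises: a KeyError on a name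
-- absent from types along the chain, or a derived_from cycle (RecursionError).
-- It holds iff the parent walk from type_name reaches, within types.length + 1 steps,
-- an entry without 'derived_from', every visited name being a key of types.
def preWalk (types : List (String × List (String × String))) : Nat → String → Bool
  | 0, _ => false
  | n + 1, type_name =>
    match (PySem.Dict.mk types).get? type_name with
    | none => false
    | some current_type =>
      match (PySem.Dict.mk current_type).get? "derived_from" with
      | some parent => preWalk types n parent
      | none => true

def Pre_create_type_hierarchy_py (type_name : String) (types : List (String × List (String × String))) : Prop :=
  preWalk types (types.length + 1) type_name = true
instance (type_name : String) (types : List (String × List (String × String))) : Decidable (Pre_create_type_hierarchy_py type_name types) := by unfold Pre_create_type_hierarchy_py; infer_instance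

def pvWitness_create_type_hierarchy_py : String × (List (String × List (String × String))) :=
  ("a", [("a", [("derived_from", "b")]), ("b", [])])

def Spec_create_type_hierarchy_py (type_name : String) (types : List (String × List (String × String))) (out : List String) : Prop := out = create_type_hierarchy_py_alt type_name types
instance (type_name : String) (types : List (String × List (String × String))) (out : List String) : Decidable (Spec_create_type_hierarchy_py type_name types out) := by unfold Spec_create_type_hierarchy_py; infer_instance

-- ===== CLAIM (what is proved, stated in full; the proofs are below) =====
def Claim_equal_create_type_hierarchy_py : Prop := ∀ (type_name : String) (types : List (String × List (String × String))), Dom_create_type_hierarchy_py type_name types → Pre_create_type_hierarchy_py type_name types → Spec_create_type_hierarchy_py type_name types (create_type_hierarchy_py type_name types)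

-- ===== LEMMAS AND PROOFS =====
-- the precomputed map agrees with A's two-step lookup (first-match on both sides)
lemma parentMap_get? (types : List (String × List (String × String))) (tn : String) :
    (bParentMap types).get? tn =
      ((PySem.Dict.mk types).get? tn).map (fun spec => (PySem.Dict.mk spec).get? "derived_from") := by
  induction types with
  | nil => rfl
  | cons h t ih =>
    obtain ⟨k, v⟩ := h
    simp only [bParentMap, List.map_cons, PySem.Dict.get?_mk_cons]
    by_cases he : k = tn
    · simp [he]
    · simp only [he, beq_iff_eq, if_false]
      simpa [bParentMap] using ih

lemma bWalk_reverse_eq (types : List (String × List (String × String))) :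
    ∀ (n : Nat) (tn : String) (acc : List String), preWalk types n tn = true →
      (bWalk (bParentMap types) n (acc ++ [tn])).reverse = aWalk types n tn ++ acc.reverse := by
  intro n
  induction n with
  | zero => intro tn acc h; simp [preWalk] at h
  | succ n ih =>
    intro tn acc h
    simp only [preWalk] at h
    cases hg : (PySem.Dict.mk types).get? tn with
    | none => simp [hg] at h
    | some ct =>
      simp only [hg] at h
      simp only [bWalk, aWalk, List.getLast?_concat, parentMap_get?, hg, Option.map_some]
      cases hd : (PySem.Dict.mk ct).get? "derived_from" with
      | none => simp
      | some p =>
        simp only [hd] at h ⊢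
        rw [ih p (acc ++ [tn]) h]
        simp

-- ===== VERDICT (by name: the statements are the Claim_ definitions above) =====
theorem create_type_hierarchy_py_spec : Claim_equal_create_type_hierarchy_py := by
  intro tn types _ hpre
  unfold Spec_create_type_hierarchy_py create_type_hierarchy_py create_type_hierarchy_py_alt
  have := bWalk_reverse_eq types (types.length + 1) tn [] hpre
  simpa using this.symm
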